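-- pv_equiv track=rewrite | github.com/arunma/DataStructuresAlgorithmsPython | lastmile/patterns/monotone_stack/DaysSinceFever.py | daysSinceFever
-- ===== SOURCE A (Python) =====
-- from typing import List
--
-- def daysSinceFever(temps: List[int]) -> List[int]:
--     N=len(temps)
--     pge=[-1]*N
--     stack=[]
--
--     for i,temp in enumerate(temps):
--         while stack and temps[stack[-1]]<temp:
--             stack.pop()
--         if stack:
--             pge[i]=i-stack[-1]
--         if temp>100:
--             stack.append(i)
--             pge[i]=0
--     return pge
-- ===== SOURCE B (Python) =====
-- from typing import List
--
-- def daysSinceFever(temps: List[int]) -> List[int]: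
--     # Single pass: the monotone stack's top is always just the most recent
--     # fever day (>100), so one integer 'last' replaces the whole stack.
--     pge = []
--     last = -1
--     for i, t in enumerate(temps):
--         if t > 100:
--             pge.append(0)
--             last = i
--         elif last != -1:
--             pge.append(i - last)
--         else:
--             pge.append(-1)
--     return pge
-- ===== Notes on version B (the rewrite author's own statement) =====
-- stated objective: simpler
-- what changed: Replaced the monotone stack with inner while-loop and the preallocated pge array by a single forward pass that appends and keeps only the index of the most recent fever day; only the most recent >100 index ever matters since non-fever temps never pop it.
import Mathlib
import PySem

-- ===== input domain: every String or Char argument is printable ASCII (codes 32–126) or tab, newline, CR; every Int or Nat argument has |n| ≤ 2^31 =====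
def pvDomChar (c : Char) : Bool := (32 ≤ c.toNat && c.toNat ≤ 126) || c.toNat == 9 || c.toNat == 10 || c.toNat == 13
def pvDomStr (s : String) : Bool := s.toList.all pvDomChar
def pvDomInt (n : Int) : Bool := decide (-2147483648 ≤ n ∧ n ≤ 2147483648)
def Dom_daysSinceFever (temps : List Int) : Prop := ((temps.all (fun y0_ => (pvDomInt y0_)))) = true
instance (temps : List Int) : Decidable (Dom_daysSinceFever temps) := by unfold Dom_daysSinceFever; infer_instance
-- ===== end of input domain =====

-- B replaces A's monotone stack + inner while loop by one pass keeping only the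
-- index of the most recent fever day (objective: simpler).

-- ===== PORT A =====
-- the inner 'while stack and temps[stack[-1]] < temp: stack.pop()' (stack top = list head)
def popLoop (temps : List Int) (temp : Int) : List Int → List Int
  | [] => []
  | j :: s => if PySem.List.pyGetD temps j 0 < temp then popLoop temps temp s else j :: s

-- one iteration of A's for-loop: state = (pge, stack)
def stepA (temps : List Int) (st : List Int × List Int) (p : Int × Int) : List Int × List Int :=
  let stack := popLoop temps p.2 st.2
  let pge := match stack with
    | [] => st.1
    | j :: _ => PySem.List.pySetD st.1 p.1 (p.1 - j)
  if p.2 > 100 then (PySem.List.pySetD pge p.1 0, p.1 :: stack) else (pge, stack)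

def daysSinceFever (temps : List Int) : List Int :=
  ((PySem.List.enumerate temps 0).foldl (stepA temps)
    (List.replicate temps.length (-1), [])).1

-- ===== PORT B =====
-- one iteration of B's loop: state = (pge built so far, index of most recent fever day)
def stepB (st : List Int × Int) (p : Int × Int) : List Int × Int :=
  if p.2 > 100 then (st.1 ++ [0], p.1)
  else if st.2 ≠ -1 then (st.1 ++ [p.1 - st.2], st.2)
  else (st.1 ++ [-1], st.2)

def daysSinceFever_alt (temps : List Int) : List Int :=
  ((PySem.List.enumerate temps 0).foldl stepB ([], -1)).1

-- ===== PRECONDITION & SPEC =====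
def Spec_daysSinceFever (temps : List Int) (out : List Int) : Prop := out = daysSinceFever_alt temps
instance (temps : List Int) (out : List Int) : Decidable (Spec_daysSinceFever temps out) := by unfold Spec_daysSinceFever; infer_instance

-- ===== CLAIM (what is proved, stated in full; the proofs are below) =====
def Claim_equal_daysSinceFever : Prop := ∀ (temps : List Int), Dom_daysSinceFever temps → Spec_daysSinceFever temps (daysSinceFever temps)

-- ===== LEMMAS AND PROOFS =====

-- intermediate loop: B's logic, but writing into a preallocated array like A
def stepM (st : List Int × Int) (p : Int × Int) : List Int × Int :=
  if p.2 > 100 then (PySem.List.pySetD st.1 p.1 0, p.1)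
  else if st.2 ≠ -1 then (PySem.List.pySetD st.1 p.1 (p.1 - st.2), st.2)
  else st

-- relation between A's stack and B's 'last'
def StackRel (stack : List Int) (last : Int) : Prop :=
  match stack with
  | [] => last = -1
  | h :: _ => last = h ∧ 0 ≤ h

theorem popLoop_subset (temps : List Int) (t : Int) :
    ∀ (s : List Int), ∀ j ∈ popLoop temps t s, j ∈ s := by
  intro s
  induction s with
  | nil => simp [popLoop]
  | cons h tl ih =>
      intro j hj
      simp only [popLoop] at hj
      split at hj
      · exact List.mem_cons_of_mem _ (ih j hj)
      · exact hj

theorem popLoop_no_pop (temps : List Int) (t : Int) (s : List Int)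
    (h : ∀ j ∈ s, ¬ PySem.List.pyGetD temps j 0 < t) : popLoop temps t s = s := by
  cases s with
  | nil => rfl
  | cons j tl => simp [popLoop, h j (List.mem_cons_self)]

theorem pySetD_pySetD {i : Int} (xs : List Int) (v w : Int) (h : 0 ≤ i) :
    PySem.List.pySetD (PySem.List.pySetD xs i v) i w = PySem.List.pySetD xs i w := by
  rw [PySem.List.pySetD_of_nonneg _ v h, PySem.List.pySetD_of_nonneg _ w h,
    PySem.List.pySetD_of_nonneg _ w h, List.set_set]

-- A's loop simulated by the preallocated-array version of B's loop
theorem sim (temps : List Int) :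
    ∀ (l : List (Int × Int)) (pge stack : List Int) (last : Int),
      (∀ p ∈ l, PySem.List.pyGetD temps p.1 0 = p.2 ∧ 0 ≤ p.1) →
      (∀ j ∈ stack, 100 < PySem.List.pyGetD temps j 0) →
      StackRel stack last →
      (l.foldl (stepA temps) (pge, stack)).1 = (l.foldl stepM (pge, last)).1 := by
  intro l
  induction l with
  | nil => intro pge stack last _ _ _; rfl
  | cons p l ih =>
      intro pge stack last hl hfev hrel
      obtain ⟨hpt, hpi⟩ := hl p (List.mem_cons_self)
      have hl' : ∀ q ∈ l, PySem.List.pyGetD temps q.1 0 = q.2 ∧ 0 ≤ q.1 :=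
        fun q hq => hl q (List.mem_cons_of_mem _ hq)
      by_cases hf : p.2 > 100
      · -- fever day: both set pge[i] := 0, A's new stack top is i, B's last is i
        have hA : stepA temps (pge, stack) p = (PySem.List.pySetD pge p.1 0, p.1 :: popLoop temps p.2 stack) := by
          cases hpop : popLoop temps p.2 stack with
          | nil => simp [stepA, hpop, hf]
          | cons j s => simp [stepA, hpop, hf, pySetD_pySetD pge _ 0 hpi]
        rw [List.foldl_cons, hA, List.foldl_cons]
        have hsM : stepM (pge, last) p = (PySem.List.pySetD pge p.1 0, p.1) := by
          simp [stepM, hf]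
        rw [hsM]
        apply ih
        · exact hl'
        · intro j hj
          rcases List.mem_cons.mp hj with h1 | h2
          · subst h1; rw [hpt]; exact hf
          · exact hfev j (popLoop_subset temps p.2 stack j h2)
        · exact ⟨rfl, hpi⟩
      · -- no fever: stack untouched (its temps all exceed 100 ≥ p.2)
        have hnp : popLoop temps p.2 stack = stack := by
          apply popLoop_no_pop
          intro j hj
          have := hfev j hj
          omega
        cases stack with
        | nil =>
            have hlast : last = -1 := hrel
            have hA : stepA temps (pge, ([] : List Int)) p = (pge, []) := by
              simp [stepA, popLoop, hf]
            have hM : stepM (pge, last) p = (pge, last) := by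
              simp [stepM, hf, hlast]
            rw [List.foldl_cons, hA, List.foldl_cons, hM]
            exact ih pge [] last hl' hfev hrel
        | cons h tl =>
            obtain ⟨hlh, hh0⟩ := hrel
            have hA : stepA temps (pge, h :: tl) p =
                (PySem.List.pySetD pge p.1 (p.1 - h), h :: tl) := by
              simp [stepA, hnp, hf]
            have hhne : h ≠ -1 := by omega
            have hM : stepM (pge, last) p =
                (PySem.List.pySetD pge p.1 (p.1 - h), last) := by
              simp [stepM, hf, hlh, hhne]
            rw [List.foldl_cons, hA, List.foldl_cons, hM]
            exact ih _ (h :: tl) last hl' hfev ⟨hlh, hh0⟩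
  
theorem set_append_cons (acc : List Int) (x v : Int) (r : List Int) :
    (acc ++ x :: r).set acc.length v = acc ++ v :: r := by
  induction acc with
  | nil => rfl
  | cons a acc ih => simp [ih]

theorem pySetD_append_cons (acc : List Int) (x v : Int) (r : List Int) :
    PySem.List.pySetD (acc ++ x :: r) (acc.length : Int) v = acc ++ v :: r := by
  rw [PySem.List.pySetD_natCast, set_append_cons]

-- the preallocated-array loop equals B's append loop
theorem setfold : ∀ (ts acc : List Int) (last : Int),
    ((PySem.List.enumerate ts (acc.length : Int)).foldl stepM
        (acc ++ List.replicate ts.length (-1), last)).1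
    = ((PySem.List.enumerate ts (acc.length : Int)).foldl stepB (acc, last)).1 := by
  intro ts
  induction ts with
  | nil => intro acc last; simp [PySem.List.enumerate_nil]
  | cons t ts ih =>
      intro acc last
      rw [PySem.List.enumerate_cons, List.foldl_cons, List.foldl_cons]
      by_cases hf : t > 100
      · have hM : stepM (acc ++ List.replicate (t :: ts).length (-1), last) ((acc.length : Int), t)
            = (acc ++ (0 : Int) :: List.replicate ts.length (-1), (acc.length : Int)) := by
          simp only [stepM, if_pos hf, List.length_cons, List.replicate_succ]
          rw [pySetD_append_cons]
        have hB : stepB (acc, last) ((acc.length : Int), t) = (acc ++ [0], (acc.length : Int)) := by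
          simp [stepB, hf]
        rw [hM, hB]
        have := ih (acc ++ [0]) (acc.length : Int)
        simpa [List.append_assoc, add_comm] using this
      · by_cases hlast : last = -1
        · have hM : stepM (acc ++ List.replicate (t :: ts).length (-1), last) ((acc.length : Int), t)
              = (acc ++ (-1 : Int) :: List.replicate ts.length (-1), last) := by
            simp [stepM, hf, hlast, List.replicate_succ]
          have hB : stepB (acc, last) ((acc.length : Int), t) = (acc ++ [-1], last) := by
            simp [stepB, hf, hlast]
          rw [hM, hB]
          have := ih (acc ++ [-1]) last
          simpa [List.append_assoc, add_comm] using this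
        · have hM : stepM (acc ++ List.replicate (t :: ts).length (-1), last) ((acc.length : Int), t)
              = (acc ++ ((acc.length : Int) - last) :: List.replicate ts.length (-1), last) := by
            simp only [stepM, if_neg (by omega : ¬ t > 100), List.length_cons, List.replicate_succ,
              if_pos (by exact hlast : last ≠ -1)]
            rw [pySetD_append_cons]
          have hB : stepB (acc, last) ((acc.length : Int), t)
              = (acc ++ [(acc.length : Int) - last], last) := by
            simp [stepB, hf, hlast]
          rw [hM, hB]
          have := ih (acc ++ [(acc.length : Int) - last]) last
          simpa [List.append_assoc, add_comm] using this

-- ===== VERDICT (by name: the statement is the Claim_ definition above) =====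
theorem daysSinceFever_spec : Claim_equal_daysSinceFever := by
  intro temps _
  unfold Spec_daysSinceFever daysSinceFever daysSinceFever_alt
  have h1 := sim temps (PySem.List.enumerate temps 0)
    (List.replicate temps.length (-1)) [] (-1)
    (by
      intro p hp
      rw [PySem.List.mem_enumerate_iff] at hp
      obtain ⟨k, hk, rfl⟩ := hp
      constructor
      · simp [PySem.List.pyGetD_natCast, List.getD_eq_getElem?_getD, hk]
      · positivity)
    (by simp)
    (by simp [StackRel])
  rw [h1]
  have h2 := setfold temps [] (-1)
  simpa using h2
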